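-- pv_equiv track=rewrite | github.com/osamaramihafez/leagueWebsite | py/main.py | prepare_team_name
-- ===== SOURCE A (Python) =====
-- def prepare_team_name(team_name):
--     tn = team_name.split() #splits by spaces in team name
--     pg = ''
--     for i in tn:
--         i.strip('')
--         x = i.split('.') #splits by . in team name i.e. A.S. Roma
--         for n in x:
--             n.strip('')
--             pg = pg + n
--     return pg
-- ===== SOURCE B (Python) =====
-- def prepare_team_name(team_name):
--     return ''.join(ch for ch in team_name if not ch.isspace() and ch != '.')
-- ===== Notes on version B (the rewrite author's own statement) =====
-- stated objective: idiomatic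
-- what changed: Replaces A's two-level token split (split by whitespace, then split each token by '.') with a concatenation accumulator by a single character-level filter pass joined once.
import Mathlib
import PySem

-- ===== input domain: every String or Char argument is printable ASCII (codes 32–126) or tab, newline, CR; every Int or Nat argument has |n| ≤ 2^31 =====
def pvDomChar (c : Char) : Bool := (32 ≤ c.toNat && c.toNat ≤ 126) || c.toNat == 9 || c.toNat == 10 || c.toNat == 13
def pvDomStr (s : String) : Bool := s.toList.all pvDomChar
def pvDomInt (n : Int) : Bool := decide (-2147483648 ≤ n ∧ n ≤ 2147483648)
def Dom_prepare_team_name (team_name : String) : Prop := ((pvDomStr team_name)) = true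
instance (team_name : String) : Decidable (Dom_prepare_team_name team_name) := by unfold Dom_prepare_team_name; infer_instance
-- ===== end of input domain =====

-- B replaces A's two-level token split with a single character filter (idiomatic; equal return values).

-- ===== PORT A =====
-- A: split by whitespace, then split each token by '.', concatenating every piece.
-- (A's 'i.strip('')' / 'n.strip('')' compute values that are discarded, so they are omitted.)
def prepare_team_name (team_name : String) : String :=
  let tn := PySem.Chars.split₀ team_name.toList
  String.mk (tn.foldl (fun pg i =>
    let x := PySem.Chars.splitOn i ['.']
    x.foldl (fun pg n => pg ++ n) pg) [])

-- ===== PORT B =====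
-- B: one pass keeping each character that is neither whitespace nor a dot.
def prepare_team_name_alt (team_name : String) : String :=
  String.mk (team_name.toList.filter (fun ch => !(PySem.Chars.isspace ch) && ch != '.'))

-- ===== PRECONDITION & SPEC =====
def Spec_prepare_team_name (team_name : String) (out : String) : Prop := out = prepare_team_name_alt team_name
instance (team_name : String) (out : String) : Decidable (Spec_prepare_team_name team_name out) := by unfold Spec_prepare_team_name; infer_instance

-- ===== CLAIM (what is proved, stated in full; the proofs are below) =====
def Claim_equal_prepare_team_name : Prop := ∀ (team_name : String), Dom_prepare_team_name team_name → Spec_prepare_team_name team_name (prepare_team_name team_name)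

-- ===== LEMMAS AND PROOFS =====

-- inner loop 'pg = pg + n' = append the flattened pieces
theorem foldl_append_flatten (l : List (List Char)) (acc : List Char) :
    l.foldl (fun pg n => pg ++ n) acc = acc ++ l.flatten := by
  induction l generalizing acc with
  | nil => simp
  | cons h t ih => simp [List.foldl_cons, ih, List.append_assoc]

-- splitting by '.' and flattening = filtering out '.'
theorem splitOn_go_dot_flatten (fuel : Nat) (l cur : List Char) (acc : List (List Char))
    (hf : l.length + 1 ≤ fuel) :
    (PySem.Chars.splitOn.go ['.'] fuel l cur acc).flatten
      = acc.reverse.flatten ++ cur.reverse ++ l.filter (fun c => c != '.') := by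
  induction fuel generalizing l cur acc with
  | zero => omega
  | succ fuel ih =>
    cases l with
    | nil => simp [PySem.Chars.splitOn.go]
    | cons c rest =>
      by_cases hc : c = '.'
      · subst hc
        have : (['.'] : List Char).isPrefixOf ('.' :: rest) = true := by
          simp [List.isPrefixOf]
        rw [PySem.Chars.splitOn.go]
        simp only [this, if_pos]
        rw [ih]
        · simp
        · simp at hf ⊢; omega
      · have hpre : (['.'] : List Char).isPrefixOf (c :: rest) = false := by
          simp [List.isPrefixOf]
          exact fun h => hc h.symm
        rw [PySem.Chars.splitOn.go]
        simp only [hpre, Bool.false_eq_true, if_false]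
        rw [ih]
        · simp [List.filter_cons, hc]
        · simp at hf ⊢; omega

theorem splitOn_dot_flatten (l : List Char) :
    (PySem.Chars.splitOn l ['.']).flatten = l.filter (fun c => c != '.') := by
  unfold PySem.Chars.splitOn
  rw [splitOn_go_dot_flatten]
  · simp
  · simp

-- split() and flattening = filtering out whitespace
theorem split₀_go_flatten (s cur : List Char) (acc : List (List Char)) :
    (PySem.Chars.split₀.go s cur acc).flatten
      = acc.reverse.flatten ++ cur.reverse ++ s.filter (fun c => !(PySem.Chars.isspace c)) := by
  induction s generalizing cur acc with
  | nil =>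
    by_cases hc : cur = []
    · subst hc; simp [PySem.Chars.split₀.go]
    · rw [PySem.Chars.split₀.go]
      simp [List.isEmpty_iff, hc]
  | cons c rest ih =>
    by_cases hs : PySem.Chars.isspace c = true
    · by_cases hc : cur = []
      · subst hc
        rw [PySem.Chars.split₀.go]
        simp only [hs, if_pos, List.isEmpty_nil, if_true]
        rw [ih]; simp [hs]
      · rw [PySem.Chars.split₀.go]
        simp only [hs, if_pos, List.isEmpty_iff, hc, if_false]
        rw [ih]; simp [hs]
    · rw [PySem.Chars.split₀.go]
      simp only [hs, Bool.false_eq_true, if_false]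
      rw [ih]; simp [hs]

theorem split₀_flatten (s : List Char) :
    (PySem.Chars.split₀ s).flatten = s.filter (fun c => !(PySem.Chars.isspace c)) := by
  unfold PySem.Chars.split₀
  rw [split₀_go_flatten]; simp

theorem outer_foldl (tn : List (List Char)) (acc : List Char) :
    tn.foldl (fun pg i => (PySem.Chars.splitOn i ['.']).foldl (fun pg n => pg ++ n) pg) acc
      = acc ++ (tn.flatten).filter (fun c => c != '.') := by
  induction tn generalizing acc with
  | nil => simp
  | cons h t ih =>
    simp only [List.foldl_cons, List.flatten_cons]
    rw [foldl_append_flatten, splitOn_dot_flatten, ih, List.filter_append, List.append_assoc]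

-- ===== VERDICT (by name: the statement is the Claim_ definition above) =====
theorem prepare_team_name_spec : Claim_equal_prepare_team_name := by
  intro s _
  unfold Spec_prepare_team_name prepare_team_name prepare_team_name_alt
  simp only [outer_foldl, split₀_flatten, List.nil_append, List.filter_filter]
  congr 1
  apply List.filter_congr
  intro c _
  simp [Bool.and_comm]
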